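-- pv_equiv track=rewrite | github.com/idf3da/SHP | Crypto/Oct-6/crypto.py | elias2dec
-- ===== SOURCE A (Python) =====
-- def bin2dec(n):
--     #Binary to decimal
--     return str(int(str(n), 2))
--
-- def chunk(l, n):
--     #Split array of items by n in each
--     for i in range(0, len(l), int(n)): yield l[i:i + int(n)]
--
-- def elias2dec(s):
--     #Decode Elias to deimals
--     prefix = int(s[0])
--     s = [int(i) for i in s[1:]]
--     frags = []
--     start = 0
--     c = 0
--     i = 0
--     while i < len(s):
--         if c:
--             if s[i] == 0:
--                 c += 1
--             elif s[i] == 1: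
--                 frags.append("".join(str(j) for j in s[start:i + c + 1]))
--                 i += c
--                 c = 0
--         else:
--             if s[i] == 1:
--                 frags.append("1")
--             elif s[i] == 0:
--                 start = i
--                 c += 1
--         i += 1
--     result = [bin2dec(i) for i in frags]
--     l = []
--     for i in result:
--         for j in range(0, int(i)):
--             l.append("1" if prefix else "0")
--         prefix = 0 if prefix else 1
--     final = []
--     for i in list(chunk("".join(l), 8)):
--         final.append(str(bin2dec(i)))
--
--     return final
-- ===== SOURCE B (Python) =====
-- def elias2dec(s):
--     # Elias-gamma decode by zero-run counting, then alternating RLE expansion and 8-bit chunking.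
--     prefix = int(s[0])
--     bits = [int(ch) for ch in s[1:]]
--     n = len(bits)
--     vals = []
--     i = 0
--     while i < n:
--         z = 0
--         while i + z < n and bits[i + z] == 0:
--             z += 1
--         if i + z == n:
--             break  # trailing zeros with no terminating 1: incomplete run, discarded
--         v = 0
--         for b in bits[i + z : i + 2 * z + 1]:
--             v = 2 * v + b
--         vals.append(v)
--         i += 2 * z + 1
--     pieces = []
--     bit = prefix
--     for v in vals:
--         pieces.append(("1" if bit else "0") * v)
--         bit = 0 if bit else 1
--     out = "".join(pieces)
--     res = []
--     for k in range(0, len(out), 8):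
--         w = 0
--         for ch in out[k:k + 8]:
--             w = 2 * w + (1 if ch == "1" else 0)
--         res.append(str(w))
--     return res
-- ===== Notes on version B (the rewrite author's own statement) =====
-- stated objective: alternative
-- what changed: Replaces A's one-character-at-a-time decoder state machine (flags c/start with index back-patching) by a standard Elias-gamma index loop that counts a zero run and takes the value slice directly, and replaces the char-by-char RLE expansion by string repetition of each run.
-- outside the precondition, e.g. on elias2dec('12'): A returns [], B returns ['3']; on elias2dec('2'): A returns [], B returns []
import Mathlib
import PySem

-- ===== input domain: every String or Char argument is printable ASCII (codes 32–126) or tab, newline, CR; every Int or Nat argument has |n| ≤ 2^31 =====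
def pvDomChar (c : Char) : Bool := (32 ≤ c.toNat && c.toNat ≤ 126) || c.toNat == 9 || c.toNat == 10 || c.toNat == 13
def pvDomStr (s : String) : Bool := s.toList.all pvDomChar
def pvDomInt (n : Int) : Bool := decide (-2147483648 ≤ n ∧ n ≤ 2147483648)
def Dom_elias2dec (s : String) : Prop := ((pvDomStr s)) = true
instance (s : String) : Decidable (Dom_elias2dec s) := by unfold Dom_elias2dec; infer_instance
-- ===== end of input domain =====

-- B replaces A's decoder state machine by a zero-run-counting Elias-gamma loop and the
-- char-by-char RLE expansion by string repetition; same cost, proved equal on binary inputs.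

-- ===== PORT A =====

-- int(x, 2): hand-ported as a binary-digit fold; exact on nonempty binary-digit strings,
-- which are the only strings that reach it under Pre_ (elsewhere Python raises ValueError).
def pvBinVal (cs : List Char) : Int :=
  cs.foldl (fun a c => 2 * a + (if c = '1' then 1 else 0)) 0

-- bin2dec(n) = str(int(str(n), 2)); its argument is already a string here (str(n) = n).
def pvBin2dec (cs : List Char) : List Char := PySem.Int.toChars (pvBinVal cs)

-- int(i) for i = str(m), m ≥ 0: hand-ported as a decimal-digit fold; exact on the canonical
-- str() output of a nonnegative int, the only strings that reach it here.
def pvDecVal (cs : List Char) : Int :=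
  ((cs.foldl (fun a c => 10 * a + (c.toNat - 48)) 0 : Nat) : Int)

-- the while-loop of elias2dec: state (frags, start, c, i)
def pvALoop (s : List Int) (frags : List (List Char)) (start c i : Nat) : List (List Char) :=
  if i < s.length then
    if c ≠ 0 then
      if s.getD i 0 = 0 then pvALoop s frags start (c + 1) (i + 1)
      else if s.getD i 0 = 1 then
        -- frags.append("".join(str(j) for j in s[start:i+c+1])); i += c; c = 0; then i += 1
        pvALoop s (frags ++ [(((s.drop start).take (i + c + 1 - start)).map PySem.Int.toChars).flatten])
          start 0 (i + c + 1)
      else pvALoop s frags start c (i + 1)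
    else
      if s.getD i 0 = 1 then pvALoop s (frags ++ [['1']]) start c (i + 1)
      else if s.getD i 0 = 0 then pvALoop s frags i (c + 1) (i + 1)
      else pvALoop s frags start c (i + 1)
  else frags
termination_by s.length - i
decreasing_by all_goals omega

-- for i in result: for j in range(0, int(i)): l.append(...); prefix = 0 if prefix else 1
def pvAExpand (result : List (List Char)) (pre : Int) : List Char :=
  (result.foldl (fun (st : Int × List Char) r =>
      ((if st.1 ≠ 0 then (0 : Int) else 1),
       (PySem.List.pyRange 0 (pvDecVal r) 1).foldl
         (fun acc _ => acc ++ [if st.1 ≠ 0 then '1' else '0']) st.2))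
    (pre, [])).2

-- chunk(l, n): for i in range(0, len(l), int(n)): yield l[i:i+int(n)]
def pvChunk (l : List Char) (n : Int) : List (List Char) :=
  (PySem.List.pyRange 0 l.length n).map (fun i => PySem.List.slice l (some i) (some (i + n)))

def elias2dec (s : String) : List String :=
  let pre : Int := (PySem.Int.ofStr? (String.ofList [(PySem.Str.pyGet? s 0).getD '0'])).getD 0
  -- s = [int(i) for i in s[1:]]
  let bits : List Int := (s.toList.drop 1).map (fun ch => (PySem.Int.ofStr? (String.ofList [ch])).getD 0)
  let frags := pvALoop bits [] 0 0 0
  let result := frags.map pvBin2dec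
  let l := pvAExpand result pre
  (pvChunk l 8).map (fun ck => String.ofList (pvBin2dec ck))

-- ===== PORT B =====

-- inner while: z = 0; while i + z < n and bits[i+z] == 0: z += 1
def pvCountZeros (bits : List Int) (i z : Nat) : Nat :=
  if i + z < bits.length ∧ bits.getD (i + z) 0 = 0 then pvCountZeros bits i (z + 1) else z
termination_by bits.length - (i + z)
decreasing_by omega

-- outer while: value = fold of bits[i+z : i+2z+1], advance i by 2z+1; break on trailing zeros
def pvBLoop (bits : List Int) (i : Nat) : List Int :=
  if i < bits.length then
    let z := pvCountZeros bits i 0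
    if i + z = bits.length then []
    else (((bits.drop (i + z)).take (z + 1)).foldl (fun a b => 2 * a + b) 0)
           :: pvBLoop bits (i + 2 * z + 1)
  else []
termination_by bits.length - i
decreasing_by omega

-- pieces.append(("1" if bit else "0") * v); bit = 0 if bit else 1
def pvBPieces (vals : List Int) (pre : Int) : List (List Char) :=
  (vals.foldl (fun (st : Int × List (List Char)) v =>
      ((if st.1 ≠ 0 then (0 : Int) else 1),
       st.2 ++ [List.replicate v.toNat (if st.1 ≠ 0 then '1' else '0')])) (pre, [])).2

def elias2dec_alt (s : String) : List String :=
  let pre : Int := (PySem.Int.ofStr? (String.ofList [(PySem.Str.pyGet? s 0).getD '0'])).getD 0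
  let bits : List Int := (s.toList.drop 1).map (fun ch => (PySem.Int.ofStr? (String.ofList [ch])).getD 0)
  let vals := pvBLoop bits 0
  let out := (pvBPieces vals pre).flatten
  -- for k in range(0, len(out), 8): w = fold of out[k:k+8]; res.append(str(w))
  (PySem.List.pyRange 0 out.length 8).map (fun k =>
    String.ofList (PySem.Int.toChars (pvBinVal (PySem.List.slice out (some k) (some (k + 8))))))

-- ===== PRECONDITION & SPEC =====

-- Pre_ restricts to nonempty binary strings (every character a zero or one bit): on other inputs A usually raises
-- ValueError or IndexError, and where a non-binary digit string happens to slip through A's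
-- state machine, the value returned (stray digits silently skipped) is an artefact of A's code.
def Pre_elias2dec (s : String) : Prop :=
  s.toList ≠ [] ∧ (s.toList.all (fun c => c == '0' || c == '1')) = true

instance (s : String) : Decidable (Pre_elias2dec s) := by unfold Pre_elias2dec; infer_instance

def pvWitness_elias2dec : String := "1011"

def Spec_elias2dec (s : String) (out : List String) : Prop := out = elias2dec_alt s
instance (s : String) (out : List String) : Decidable (Spec_elias2dec s out) := by
  unfold Spec_elias2dec; infer_instance

-- ===== CLAIM (what is proved, stated in full; the proofs are below) =====
def Claim_equal_elias2dec : Prop :=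
  ∀ (s : String), Dom_elias2dec s → Pre_elias2dec s → Spec_elias2dec s (elias2dec s)

-- ===== LEMMAS AND PROOFS =====

-- decimal round trip: pvDecVal (str(m)) = m for m ≥ 0
theorem pvCoreApp (b : Nat) : ∀ (f n : Nat) (acc : List Char),
    Nat.toDigitsCore b f n acc = Nat.toDigitsCore b f n [] ++ acc := by
  intro f
  induction f with
  | zero => intro n acc; simp [Nat.toDigitsCore]
  | succ f ih =>
    intro n acc
    simp only [Nat.toDigitsCore]
    by_cases h : n / b = 0
    · simp [h]
    · simp only [h, if_false]
      rw [ih (n / b) (Nat.digitChar (n % b) :: acc), ih (n / b) [Nat.digitChar (n % b)]]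
      simp

theorem pvFuelIrrel : ∀ (f f' n : Nat) (acc : List Char), 0 < f → 0 < f' →
    n < 10 ^ f → n < 10 ^ f' → Nat.toDigitsCore 10 f n acc = Nat.toDigitsCore 10 f' n acc := by
  intro f
  induction f with
  | zero => intro f' n acc h; omega
  | succ f ih =>
    intro f' n acc _ hf' hn hn'
    obtain ⟨f'', rfl⟩ : ∃ k, f' = k + 1 := ⟨f' - 1, by omega⟩
    simp only [Nat.toDigitsCore]
    by_cases h : n / 10 = 0
    · simp [h]
    · simp only [h, if_false]
      have h1 : 0 < f := by
        by_contra hc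
        have : f = 0 := by omega
        subst this
        simp at hn
        omega
      have h2 : 0 < f'' := by
        by_contra hc
        have : f'' = 0 := by omega
        subst this
        simp at hn'
        omega
      exact ih f'' (n / 10) _ h1 h2
        (Nat.div_lt_of_lt_mul (by rw [← pow_succ']; exact hn))
        (Nat.div_lt_of_lt_mul (by rw [← pow_succ']; exact hn'))

theorem pvCoreSucc (f n : Nat) (acc : List Char) :
    Nat.toDigitsCore 10 (f + 1) n acc =
      if n / 10 = 0 then Nat.digitChar (n % 10) :: acc
      else Nat.toDigitsCore 10 f (n / 10) (Nat.digitChar (n % 10) :: acc) := by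
  rfl

theorem pvToDigitsSmall (n : Nat) (h : n < 10) : Nat.toDigits 10 n = [Nat.digitChar n] := by
  simp [Nat.toDigits, Nat.toDigitsCore, Nat.div_eq_of_lt h, Nat.mod_eq_of_lt h]

theorem pvToDigitsStep (n : Nat) (h : 10 ≤ n) :
    Nat.toDigits 10 n = Nat.toDigits 10 (n / 10) ++ [Nat.digitChar (n % 10)] := by
  have hd : n / 10 ≠ 0 := by
    have := Nat.div_le_div_right (c := 10) h
    simp at this; omega
  have hn10 : n < 10 ^ n := Nat.lt_pow_self (by norm_num)
  conv_lhs => rw [Nat.toDigits]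
  rw [pvCoreSucc, if_neg hd, pvCoreApp]
  congr 1
  rw [Nat.toDigits]
  apply pvFuelIrrel
  · omega
  · omega
  · calc n / 10 < n := Nat.div_lt_self (by omega) (by norm_num)
      _ < 10 ^ n := hn10
  · calc n / 10 < 10 ^ (n / 10) := Nat.lt_pow_self (by norm_num)
      _ ≤ 10 ^ (n / 10 + 1) := Nat.pow_le_pow_right (by norm_num) (by omega)

theorem pvDigitCharVal (r : Nat) (h : r < 10) : (Nat.digitChar r).toNat - 48 = r := by
  interval_cases r <;> decide

theorem pvNatFoldToDigits (n : Nat) :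
    List.foldl (fun a c => 10 * a + (c.toNat - 48)) 0 (Nat.toDigits 10 n) = n := by
  induction n using Nat.strong_induction_on with
  | _ n ih =>
    by_cases h : n < 10
    · rw [pvToDigitsSmall n h]
      simp [pvDigitCharVal n h]
    · rw [Nat.not_lt] at h
      rw [pvToDigitsStep n h, List.foldl_append]
      rw [ih (n / 10) (Nat.div_lt_self (by omega) (by norm_num))]
      simp [pvDigitCharVal (n % 10) (Nat.mod_lt _ (by norm_num))]
      omega

theorem pvDecVal_toChars (v : Int) (hv : 0 ≤ v) : pvDecVal (PySem.Int.toChars v) = v := by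
  unfold pvDecVal PySem.Int.toChars
  rw [if_neg (by omega)]
  rw [pvNatFoldToDigits]
  exact Int.toNat_of_nonneg hv

theorem pvBinVal_fold_nonneg (cs : List Char) : ∀ a : Int, 0 ≤ a →
    0 ≤ cs.foldl (fun a c => 2 * a + (if c = '1' then 1 else 0)) a := by
  induction cs with
  | nil => intro a ha; simpa using ha
  | cons c t ih =>
    intro a ha
    simp only [List.foldl_cons]
    apply ih
    split_ifs <;> omega

theorem pvBinVal_nonneg (cs : List Char) : 0 ≤ pvBinVal cs :=
  pvBinVal_fold_nonneg cs 0 le_rfl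

theorem pvFlattenToChars (xs : List Int) (h : ∀ x ∈ xs, x = 0 ∨ x = 1) : ∀ a : Int,
    ((xs.map PySem.Int.toChars).flatten).foldl (fun a c => 2 * a + (if c = '1' then 1 else 0)) a
      = xs.foldl (fun a b => 2 * a + b) a := by
  induction xs with
  | nil => intro a; rfl
  | cons x t ih =>
    intro a
    simp only [List.map_cons, List.flatten_cons, List.foldl_append, List.foldl_cons]
    rcases h x List.mem_cons_self with rfl | rfl
    · rw [show PySem.Int.toChars 0 = ['0'] from by decide]
      simpa using ih (fun y hy => h y (List.mem_cons_of_mem _ hy)) (2 * a + 0)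
    · rw [show PySem.Int.toChars 1 = ['1'] from by decide]
      simpa using ih (fun y hy => h y (List.mem_cons_of_mem _ hy)) (2 * a + 1)

theorem pvFoldZeros (z : Nat) :
    (List.replicate z (0 : Int)).foldl (fun a b => 2 * a + b) 0 = 0 := by
  induction z with
  | zero => rfl
  | succ n ih => simpa [List.replicate_succ] using ih

-- specification of the zero-run counter
theorem pvCz_spec (bits : List Int) (i z : Nat) :
    z ≤ pvCountZeros bits i z ∧
    (∀ j, z ≤ j → j < pvCountZeros bits i z → i + j < bits.length ∧ bits.getD (i + j) 0 = 0) ∧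
    (i + pvCountZeros bits i z < bits.length → bits.getD (i + pvCountZeros bits i z) 0 ≠ 0) ∧
    (i + z ≤ bits.length → i + pvCountZeros bits i z ≤ bits.length) := by
  induction z using pvCountZeros.induct bits i with
  | case1 z h ih =>
    rw [pvCountZeros, if_pos h]
    obtain ⟨ih1, ih2, ih3, ih4⟩ := ih
    refine ⟨by omega, ?_, ih3, fun _ => ih4 (by omega)⟩
    intro j hj1 hj2
    rcases Nat.eq_or_lt_of_le hj1 with rfl | hlt
    · exact ⟨h.1, h.2⟩
    · exact ih2 j hlt hj2
  | case2 z h =>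
    rw [pvCountZeros, if_neg h]
    refine ⟨le_rfl, fun j hj1 hj2 => absurd (lt_of_le_of_lt hj1 hj2) (lt_irrefl z), ?_, fun h' => h'⟩
    intro hlt h0
    exact h ⟨hlt, h0⟩

theorem pvCz_unique (bits : List Int) (i c : Nat)
    (hz : ∀ j, j < c → bits.getD (i + j) 0 = 0) (hlen : i + c ≤ bits.length)
    (hstop : i + c = bits.length ∨ bits.getD (i + c) 0 ≠ 0) :
    pvCountZeros bits i 0 = c := by
  obtain ⟨h1, h2, h3, h4⟩ := pvCz_spec bits i 0
  rcases lt_trichotomy (pvCountZeros bits i 0) c with hlt | heq | hgt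
  · exact absurd (hz _ hlt) (h3 (by omega))
  · exact heq
  · obtain ⟨hcl, hc0⟩ := h2 c (Nat.zero_le _) hgt
    rcases hstop with he | hne
    · omega
    · exact absurd hc0 hne

-- the loop of A only ever appends to frags
theorem pvALoop_append (bits : List Int) : ∀ (n i st c : Nat) (fs : List (List Char)),
    bits.length - i ≤ n → pvALoop bits fs st c i = fs ++ pvALoop bits [] st c i := by
  intro n
  induction n with
  | zero =>
    intro i st c fs h
    rw [pvALoop]; conv_rhs => rw [pvALoop]
    have : ¬ i < bits.length := by omega
    simp [this]
  | succ n ih =>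
    intro i st c fs h
    rw [pvALoop]; conv_rhs => rw [pvALoop]
    by_cases hi : i < bits.length
    · simp only [if_pos hi]
      by_cases hc : c ≠ 0
      · simp only [if_pos hc]
        by_cases h0 : bits.getD i 0 = 0
        · simp only [if_pos h0]; exact ih (i + 1) st (c + 1) fs (by omega)
        · simp only [if_neg h0]
          by_cases h1 : bits.getD i 0 = 1
          · simp only [if_pos h1]
            rw [ih (i + c + 1) st 0 _ (by omega), ih (i + c + 1) st 0 ([] ++ [_]) (by omega)]
            simp
          · simp only [if_neg h1]; exact ih (i + 1) st c fs (by omega)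
      · simp only [if_neg hc]
        by_cases h1 : bits.getD i 0 = 1
        · simp only [if_pos h1]
          rw [ih (i + 1) st c _ (by omega), ih (i + 1) st c ([] ++ [_]) (by omega)]
          simp
        · simp only [if_neg h1]
          by_cases h0 : bits.getD i 0 = 0
          · simp only [if_pos h0]; exact ih (i + 1) i (c + 1) fs (by omega)
          · simp only [if_neg h0]; exact ih (i + 1) st c fs (by omega)
    · simp [hi]

-- entering the loop in zero-counting state with c zeros already seen (positions i..i+c)
theorem pvALoop_zrun (bits : List Int) (hbin : ∀ x ∈ bits, x = 0 ∨ x = 1) :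
    ∀ (n i c : Nat) (fs : List (List Char)), bits.length - (i + c) ≤ n → 1 ≤ c →
    i + c ≤ bits.length → (∀ j, j < c → bits.getD (i + j) 0 = 0) →
    pvALoop bits fs i c (i + c) =
      if i + pvCountZeros bits i 0 = bits.length then fs
      else pvALoop bits
        (fs ++ [(((bits.drop i).take (2 * pvCountZeros bits i 0 + 1)).map PySem.Int.toChars).flatten])
        i 0 (i + 2 * pvCountZeros bits i 0 + 1) := by
  intro n
  induction n with
  | zero =>
    intro i c fs h h1 h2 hz
    have hic : i + c = bits.length := by omega
    have hq : pvCountZeros bits i 0 = c := pvCz_unique bits i c hz h2 (Or.inl hic)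
    rw [pvALoop]
    simp [hic, hq]
  | succ n ih =>
    intro i c fs h h1 h2 hz
    by_cases hic : i + c = bits.length
    · have hq : pvCountZeros bits i 0 = c := pvCz_unique bits i c hz h2 (Or.inl hic)
      rw [pvALoop]
      simp [hic, hq]
    · have hlt : i + c < bits.length := by omega
      rw [pvALoop, if_pos hlt, if_pos (show c ≠ 0 by omega)]
      have hmem : bits.getD (i + c) 0 ∈ bits := by
        rw [List.getD_eq_getElem bits 0 hlt]
        exact List.getElem_mem hlt
      rcases hbin _ hmem with h0 | h1c
      · rw [if_pos h0]
        have hznew : ∀ j, j < c + 1 → bits.getD (i + j) 0 = 0 := by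
          intro j hj
          rcases Nat.lt_or_ge j c with hj' | hj'
          · exact hz j hj'
          · have : j = c := by omega
            subst this; exact h0
        have := ih i (c + 1) fs (by omega) (by omega) (by omega) hznew
        rw [show i + c + 1 = i + (c + 1) by omega]
        exact this
      · have hne0 : bits.getD (i + c) 0 ≠ 0 := by rw [h1c]; norm_num
        rw [if_neg hne0, if_pos h1c]
        have hq : pvCountZeros bits i 0 = c := pvCz_unique bits i c hz (by omega) (Or.inr hne0)
        rw [hq, if_neg hic]
        rw [show i + c + c + 1 - i = 2 * c + 1 by omega, show i + c + c + 1 = i + 2 * c + 1 by omega]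

-- value of a fragment: the 2z+1 bits from position i (z zeros, the 1, up to z value bits)
theorem pvFragVal (bits : List Int) (hbin : ∀ x ∈ bits, x = 0 ∨ x = 1) (i z : Nat)
    (hz : ∀ j, j < z → bits.getD (i + j) 0 = 0) (hlen : i + z ≤ bits.length) :
    pvBinVal ((((bits.drop i).take (2 * z + 1)).map PySem.Int.toChars).flatten)
      = ((bits.drop (i + z)).take (z + 1)).foldl (fun a b => 2 * a + b) 0 := by
  have hsplit : (bits.drop i).take (2 * z + 1)
      = (bits.drop i).take z ++ ((bits.drop (i + z)).take (z + 1)) := by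
    rw [show 2 * z + 1 = z + (z + 1) by omega, List.take_add, List.drop_drop]
  have hzeros : (bits.drop i).take z = List.replicate z 0 := by
    apply List.eq_replicate_iff.mpr
    constructor
    · rw [List.length_take, List.length_drop]; omega
    · intro b hb
      obtain ⟨j, hjlt, hgb⟩ := List.getElem_of_mem hb
      have hj2 : j < z := by
        have := hjlt
        simp [List.length_take, List.length_drop] at this
        omega
      have hjlen : i + j < bits.length := by
        have := hjlt
        simp [List.length_take, List.length_drop] at this
        omega
      rw [List.getElem_take, List.getElem_drop] at hgb
      rw [← hgb, ← List.getD_eq_getElem bits 0 hjlen]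
      exact hz j hj2
  unfold pvBinVal
  have hmem : ∀ x ∈ (bits.drop i).take (2 * z + 1), x = 0 ∨ x = 1 := by
    intro x hx
    exact hbin x (List.mem_of_mem_drop (List.mem_of_mem_take hx))
  rw [pvFlattenToChars _ hmem, hsplit, List.foldl_append, hzeros, pvFoldZeros]

-- the decode loops agree (A entered with c = 0)
theorem pvDecode (bits : List Int) (hbin : ∀ x ∈ bits, x = 0 ∨ x = 1) :
    ∀ (n i st : Nat), bits.length - i ≤ n →
    (pvALoop bits [] st 0 i).map pvBinVal = pvBLoop bits i := by
  intro n
  induction n with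
  | zero =>
    intro i st h
    rw [pvALoop, pvBLoop]
    have : ¬ i < bits.length := by omega
    simp [this]
  | succ n ih =>
    intro i st h
    by_cases hi : i < bits.length
    · rw [pvALoop, if_pos hi, if_neg (show ¬ ((0 : Nat) ≠ 0) by simp)]
      have hmem : bits.getD i 0 ∈ bits := by
        rw [List.getD_eq_getElem bits 0 hi]
        exact List.getElem_mem hi
      obtain ⟨hs1, hs2, hs3, hs4⟩ := pvCz_spec bits i 0
      rcases hbin _ hmem with h0 | h1
      · -- current bit 0: A starts a zero run
        rw [if_neg (by rw [h0]; norm_num), if_pos h0]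
        have hz1 : ∀ j, j < 1 → bits.getD (i + j) 0 = 0 := by
          intro j hj
          have : j = 0 := by omega
          subst this
          simpa using h0
        have hrw := pvALoop_zrun bits hbin bits.length i 1 [] (by omega) le_rfl (by omega) hz1
        rw [hrw]
        have hzpos : 1 ≤ pvCountZeros bits i 0 := by
          by_contra hc
          have h0' : pvCountZeros bits i 0 = 0 := by omega
          have := hs3 (by omega)
          rw [h0'] at this
          simp at this
          exact this h0
        rw [pvBLoop, if_pos hi]
        by_cases hend : i + pvCountZeros bits i 0 = bits.length
        · simp [hend]
        · simp only [if_neg hend]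
          rw [pvALoop_append bits bits.length _ _ _ _ (by omega)]
          simp only [List.nil_append, List.map_cons, List.singleton_append]
          rw [pvFragVal bits hbin i (pvCountZeros bits i 0)
                (fun j hj => (hs2 j (Nat.zero_le _) hj).2) (hs4 (by omega))]
          rw [ih (i + 2 * pvCountZeros bits i 0 + 1) i (by omega)]
      · -- current bit 1: lone "1"
        rw [if_pos h1]
        rw [pvALoop_append bits bits.length _ _ _ _ (by omega)]
        simp only [List.nil_append, List.map_cons, List.singleton_append]
        rw [ih (i + 1) st (by omega)]
        have hz0 : pvCountZeros bits i 0 = 0 := by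
          apply pvCz_unique bits i 0 (by intro j hj; omega) (by omega)
          right
          intro hcon
          rw [Nat.add_zero, h1] at hcon
          exact one_ne_zero hcon
        conv_rhs => rw [pvBLoop]
        rw [if_pos hi]
        simp only [hz0]
        rw [if_neg (show ¬ i + 0 = bits.length by omega)]
        have hdrop : bits.drop i = bits[i] :: bits.drop (i + 1) := List.drop_eq_getElem_cons hi
        have htake : List.take 1 (List.drop (i + 0) bits) = [bits.getD i 0] := by
          rw [Nat.add_zero, hdrop, List.getD_eq_getElem bits 0 hi]
          rfl
        rw [htake, h1]
        simp [pvBinVal]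
    · rw [pvALoop, pvBLoop]
      simp [hi]

-- common form of the RLE expansion
def pvGo : List Int → Int → List (List Char)
  | [], _ => []
  | v :: t, p => List.replicate v.toNat (if p ≠ 0 then '1' else '0') :: pvGo t (if p ≠ 0 then 0 else 1)

theorem pvInnerRange (v : Int) (ch : Char) (acc : List Char) :
    (PySem.List.pyRange 0 v 1).foldl (fun a _ => a ++ [ch]) acc = acc ++ List.replicate v.toNat ch := by
  rw [PySem.List.pyRange_one, List.foldl_map]
  rw [show (v - 0).toNat = v.toNat by simp]
  induction v.toNat generalizing acc with
  | zero => simp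
  | succ n ihn =>
    rw [List.range_succ, List.foldl_append, ihn]
    simp [List.replicate_succ']

theorem pvAExpandAux (frags : List (List Char)) : ∀ (p : Int) (acc : List Char),
    ((frags.map pvBin2dec).foldl (fun (st : Int × List Char) r =>
        ((if st.1 ≠ 0 then (0 : Int) else 1),
         (PySem.List.pyRange 0 (pvDecVal r) 1).foldl
           (fun a _ => a ++ [if st.1 ≠ 0 then '1' else '0']) st.2)) (p, acc)).2
      = acc ++ (pvGo (frags.map pvBinVal) p).flatten := by
  induction frags with
  | nil => intro p acc; simp [pvGo]
  | cons f t ih =>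
    intro p acc
    simp only [List.map_cons, List.foldl_cons]
    rw [show pvDecVal (pvBin2dec f) = pvBinVal f from by
          unfold pvBin2dec; exact pvDecVal_toChars _ (pvBinVal_nonneg f)]
    rw [pvInnerRange, ih]
    simp [pvGo]

theorem pvAExpand_go (frags : List (List Char)) (p : Int) :
    pvAExpand (frags.map pvBin2dec) p = (pvGo (frags.map pvBinVal) p).flatten := by
  unfold pvAExpand
  rw [pvAExpandAux]
  simp

theorem pvBPieces_go (vals : List Int) : ∀ (p : Int) (acc : List (List Char)),
    ((vals.foldl (fun (st : Int × List (List Char)) v =>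
        ((if st.1 ≠ 0 then (0 : Int) else 1),
         st.2 ++ [List.replicate v.toNat (if st.1 ≠ 0 then '1' else '0')])) (p, acc)).2)
      = acc ++ pvGo vals p := by
  induction vals with
  | nil => intro p acc; simp [pvGo]
  | cons v t ih =>
    intro p acc
    simp only [List.foldl_cons]
    rw [ih]
    simp [pvGo]

theorem pvBPieces_eq_go (vals : List Int) (p : Int) : pvBPieces vals p = pvGo vals p := by
  unfold pvBPieces
  rw [pvBPieces_go]
  simp

-- ===== VERDICT (by name: the statement is the Claim_ definition above) =====
theorem elias2dec_spec : Claim_equal_elias2dec := by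
  intro s _ hpre
  obtain ⟨hne, hbcb⟩ := hpre
  have hbc : ∀ c ∈ s.toList, c = '0' ∨ c = '1' := by
    intro c hc
    have := List.all_eq_true.mp hbcb c hc
    simpa using this
  show elias2dec s = elias2dec_alt s
  unfold elias2dec elias2dec_alt
  dsimp only
  have hbin : ∀ x ∈ (s.toList.drop 1).map
      (fun ch => (PySem.Int.ofStr? (String.ofList [ch])).getD 0), x = 0 ∨ x = 1 := by
    intro x hx
    obtain ⟨ch, hch, rfl⟩ := List.mem_map.mp hx
    have hmem : ch ∈ s.toList := List.mem_of_mem_drop hch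
    rcases hbc ch hmem with rfl | rfl
    · left; decide
    · right; decide
  set bits := (s.toList.drop 1).map
      (fun ch => (PySem.Int.ofStr? (String.ofList [ch])).getD 0) with hbits
  set pre := (PySem.Int.ofStr? (String.ofList [(PySem.Str.pyGet? s 0).getD '0'])).getD 0 with hpredef
  have h1 : (pvALoop bits [] 0 0 0).map pvBinVal = pvBLoop bits 0 :=
    pvDecode bits hbin bits.length 0 0 (by omega)
  have hl : pvAExpand ((pvALoop bits [] 0 0 0).map pvBin2dec) pre
      = (pvBPieces (pvBLoop bits 0) pre).flatten := by
    rw [pvAExpand_go, h1, pvBPieces_eq_go]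
  rw [hl]
  unfold pvChunk
  rw [List.map_map]
  rfl
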